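-- pv_equiv track=rewrite | github.com/spillz/minepy2 | blocks.py | _rotate_dir
-- ===== SOURCE A (Python) =====
-- def _rotate_dir(dir_idx, turns):
--     if dir_idx <= 1:
--         return dir_idx
--     turns %= 4
--     for _ in range(turns):
--         if dir_idx == 4:
--             dir_idx = 3
--         elif dir_idx == 3:
--             dir_idx = 5
--         elif dir_idx == 5:
--             dir_idx = 2
--         elif dir_idx == 2:
--             dir_idx = 4
--     return dir_idx
-- ===== SOURCE B (Python) =====
-- _CYCLE = [4, 3, 5, 2]
--
-- def _rotate_dir(dir_idx, turns):
--     if dir_idx <= 1: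
--         return dir_idx
--     if dir_idx not in _CYCLE:
--         return dir_idx
--     return _CYCLE[(_CYCLE.index(dir_idx) + turns) % 4]
-- ===== Notes on version B (the rewrite author's own statement) =====
-- stated objective: simpler
-- what changed: Replaces the per-turn stepping loop with a single modular lookup in the cyclic order table [4,3,5,2].
import Mathlib
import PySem

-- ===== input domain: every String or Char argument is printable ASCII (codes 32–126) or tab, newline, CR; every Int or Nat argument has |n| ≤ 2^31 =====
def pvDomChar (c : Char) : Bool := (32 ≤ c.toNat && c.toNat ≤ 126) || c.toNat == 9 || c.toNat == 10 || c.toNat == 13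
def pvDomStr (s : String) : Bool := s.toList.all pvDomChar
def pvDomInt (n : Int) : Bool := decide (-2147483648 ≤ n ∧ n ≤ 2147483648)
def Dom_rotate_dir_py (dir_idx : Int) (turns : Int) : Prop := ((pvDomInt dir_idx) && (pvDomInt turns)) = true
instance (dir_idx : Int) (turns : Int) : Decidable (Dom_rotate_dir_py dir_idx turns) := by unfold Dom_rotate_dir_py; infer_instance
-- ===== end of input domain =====

-- B replaces A's per-turn stepping loop with a single modular lookup in the cyclic table [4,3,5,2] (simpler).
-- ===== PORT A =====
def pvStep (d : Int) : Int :=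
  if d == 4 then 3
  else if d == 3 then 5
  else if d == 5 then 2
  else if d == 2 then 4
  else d

def rotate_dir_py (dir_idx : Int) (turns : Int) : Int :=
  if dir_idx ≤ 1 then dir_idx
  else
    let t := PySem.Int.mod turns 4
    (PySem.List.pyRange 0 t 1).foldl (fun d _ => pvStep d) dir_idx

-- ===== PORT B =====
def pvCycle : List Int := [4, 3, 5, 2]

def rotate_dir_py_alt (dir_idx : Int) (turns : Int) : Int :=
  if dir_idx ≤ 1 then dir_idx
  else if ¬ (dir_idx ∈ pvCycle) then dir_idx
  else
    match PySem.List.index? pvCycle dir_idx with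
    | some i => (PySem.List.pyGet? pvCycle (PySem.Int.mod ((i : Int) + turns) 4)).getD 0
    | none => dir_idx

-- ===== PRECONDITION & SPEC =====
def Spec_rotate_dir_py (dir_idx : Int) (turns : Int) (out : Int) : Prop := out = rotate_dir_py_alt dir_idx turns
instance (dir_idx : Int) (turns : Int) (out : Int) : Decidable (Spec_rotate_dir_py dir_idx turns out) := by unfold Spec_rotate_dir_py; infer_instance

-- ===== CLAIM (what is proved, stated in full; the proofs are below) =====
def Claim_equal_rotate_dir_py : Prop := ∀ (dir_idx : Int) (turns : Int), Dom_rotate_dir_py dir_idx turns → Spec_rotate_dir_py dir_idx turns (rotate_dir_py dir_idx turns)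

-- ===== LEMMAS AND PROOFS =====

theorem pv_mod_4_cases (turns : Int) : PySem.Int.mod turns 4 = 0 ∨ PySem.Int.mod turns 4 = 1 ∨
    PySem.Int.mod turns 4 = 2 ∨ PySem.Int.mod turns 4 = 3 := by
  unfold PySem.Int.mod; simp only [Int.fmod_eq_emod]; omega

theorem pv_mod_subst {turns c : Int} (h : PySem.Int.mod turns 4 = c) (i : Int) :
    PySem.Int.mod (i + turns) 4 = PySem.Int.mod (i + c) 4 := by
  unfold PySem.Int.mod at *; simp only [Int.fmod_eq_emod] at *; omega

theorem pvStep_fix {d : Int} (h : pvStep d = d) (l : List Int) :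
    l.foldl (fun d _ => pvStep d) d = d := by
  induction l with
  | nil => rfl
  | cons x xs ih => simpa [List.foldl, h] using ih

-- ===== VERDICT (by name: the statement is the Claim_ definition above) =====
theorem rotate_dir_py_spec : Claim_equal_rotate_dir_py := by
  intro dir_idx turns _
  unfold Spec_rotate_dir_py rotate_dir_py rotate_dir_py_alt
  by_cases h1 : dir_idx ≤ 1
  · simp [h1]
  · simp only [h1, if_false]
    by_cases hc : dir_idx ∈ pvCycle
    · have hd : dir_idx = 4 ∨ dir_idx = 3 ∨ dir_idx = 5 ∨ dir_idx = 2 := by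
        simpa [pvCycle] using hc
      rcases hd with h | h | h | h <;> subst h <;>
        rcases pv_mod_4_cases turns with ht | ht | ht | ht <;>
          simp only [pv_mod_subst ht, ht] <;> decide
    · obtain ⟨n4, n3, n5, n2⟩ : dir_idx ≠ 4 ∧ dir_idx ≠ 3 ∧ dir_idx ≠ 5 ∧ dir_idx ≠ 2 := by
        simpa [pvCycle] using hc
      have hs : pvStep dir_idx = dir_idx := by
        simp [pvStep, n4, n3, n5, n2]
      simp [hc, pvStep_fix hs]
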